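-- pv_equiv track=rewrite | github.com/belarara/AoC_2022 | 18/day_18.py | count_edges_in_blocks
-- ===== SOURCE A (Python) =====
-- def count_edges_in_blocks(blocks):
--     count_edges = 0
--     for i in range(3):
--         for key in blocks[i].keys():
--             found = False
--             max_value = max(blocks[i][key])
--             for j in range(max_value+4):
--                 if not found and j in blocks[i][key]:
--                     found = True
--                     count_edges += 2
--                 elif found and j not in blocks[i][key]:
--                     found = False
--     return count_edges
-- ===== SOURCE B (Python) =====
-- def count_edges_in_blocks(blocks):
--     total = 0
--     for i in range(3):
--         block = blocks[i]
--         for vals in block.values():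
--             s = set(vals)
--             total += 2 * sum(1 for v in s if v >= 0 and (v == 0 or v - 1 not in s))
--     return total
-- ===== Notes on version B (the rewrite author's own statement) =====
-- stated objective: faster
-- what changed: Instead of scanning every integer j in range(max_value+4) per key with a found-flag state machine, B builds a set of each key's values once and counts the values v >= 0 that start a run (v == 0 or v-1 absent), doubling the count.
import Mathlib
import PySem

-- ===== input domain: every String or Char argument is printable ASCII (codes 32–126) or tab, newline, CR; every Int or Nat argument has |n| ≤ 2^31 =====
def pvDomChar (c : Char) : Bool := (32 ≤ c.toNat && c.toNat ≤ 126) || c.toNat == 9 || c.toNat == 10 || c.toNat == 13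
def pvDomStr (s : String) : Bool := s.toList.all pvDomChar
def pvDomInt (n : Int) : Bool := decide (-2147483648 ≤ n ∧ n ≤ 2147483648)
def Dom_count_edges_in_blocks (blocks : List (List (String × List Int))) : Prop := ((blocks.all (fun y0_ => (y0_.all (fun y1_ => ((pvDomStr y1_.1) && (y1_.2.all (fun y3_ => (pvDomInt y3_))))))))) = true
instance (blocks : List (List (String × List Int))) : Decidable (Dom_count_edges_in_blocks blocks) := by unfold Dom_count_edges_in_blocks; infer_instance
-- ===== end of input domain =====

-- B replaces A's scan of every j in range(max+4) per key by counting, over the distinct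
-- values of each key, those that start a run (v ≥ 0 and no scanned predecessor) — O(n) per key
-- instead of O(max_value) per key.

-- ===== PORT A =====
-- one step of A's inner 'for j in range(max_value+4)' loop; state = (found, count_edges)
def pvStepA (vals : List Int) (st : Bool × Int) (j : Int) : Bool × Int :=
  if !st.1 && vals.contains j then (true, st.2 + 2)
  else if st.1 && !vals.contains j then (false, st.2)
  else st

def count_edges_in_blocks (blocks : List (List (String × List Int))) : Int :=
  (PySem.List.pyRange 0 3 1).foldl (fun acc i =>
    let d := PySem.Dict.ofList ((PySem.List.pyGet? blocks i).getD [])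
    d.keys.foldl (fun acc key =>
      let vals := (d.get? key).getD []
      let max_value := (PySem.List.max? vals (fun x => x)).getD 0
      ((PySem.List.pyRange 0 (max_value + 4) 1).foldl (pvStepA vals) (false, acc)).2) acc) 0

-- ===== PORT B =====
-- 'v >= 0 and (v == 0 or v - 1 not in s)' from Source B
def pvStartB (s : List Int) (v : Int) : Bool :=
  (0 ≤ v) && (v == 0 || !(s.contains (v - 1)))

def count_edges_in_blocks_alt (blocks : List (List (String × List Int))) : Int :=
  (PySem.List.pyRange 0 3 1).foldl (fun total i =>
    let block := (PySem.List.pyGet? blocks i).getD []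
    (PySem.Dict.ofList block).values.foldl (fun total vals =>
      let s := PySem.Set.ofList vals
      total + 2 * ((s.countP (pvStartB s) : Nat) : Int)) total) 0

-- ===== PRECONDITION & SPEC =====
-- Pre_ excludes exactly the inputs on which Python A raises: fewer than three dicts
-- (IndexError on blocks[i]) or an empty value list in the first three dicts
-- (ValueError: max of an empty sequence).
def Pre_count_edges_in_blocks (blocks : List (List (String × List Int))) : Prop :=
  3 ≤ blocks.length ∧
  ∀ block ∈ blocks.take 3, ∀ vs ∈ (PySem.Dict.ofList block).values, vs ≠ []
instance (blocks : List (List (String × List Int))) : Decidable (Pre_count_edges_in_blocks blocks) := by unfold Pre_count_edges_in_blocks; infer_instance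
def pvWitness_count_edges_in_blocks : (List (List (String × List Int))) :=
  ([[("x", [0, 1, 3])], [("y", [2])], [("z", [0, 5, 6])]])

def Spec_count_edges_in_blocks (blocks : List (List (String × List Int))) (out : Int) : Prop := out = count_edges_in_blocks_alt blocks
instance (blocks : List (List (String × List Int))) (out : Int) : Decidable (Spec_count_edges_in_blocks blocks out) := by unfold Spec_count_edges_in_blocks; infer_instance

-- ===== CLAIM (what is proved, stated in full; the proofs are below) =====
def Claim_equal_count_edges_in_blocks : Prop := ∀ (blocks : List (List (String × List Int))), Dom_count_edges_in_blocks blocks → Pre_count_edges_in_blocks blocks → Spec_count_edges_in_blocks blocks (count_edges_in_blocks blocks)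
-- ===== LEMMAS AND PROOFS =====

-- A's run-start predicate over scanned indices j ≥ 0
def pvQ (vals : List Int) (j : Int) : Bool :=
  vals.contains j && (j == 0 || !(vals.contains (j - 1)))

-- invariant of A's inner scan: after scanning [0, n) the flag records membership of n-1
-- and the count has grown by 2 per run start seen
lemma pvScan (vals : List Int) (acc : Int) : ∀ n : Nat,
    (PySem.List.pyRange 0 (n : Int) 1).foldl (pvStepA vals) (false, acc)
    = ((decide (0 < n) && vals.contains ((n : Int) - 1)),
       acc + 2 * (((PySem.List.pyRange 0 (n : Int) 1).countP (pvQ vals) : Nat) : Int)) := by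
  intro n
  induction n with
  | zero => simp [PySem.List.pyRange_one_eq_nil]
  | succ n ih =>
    have hsplit : PySem.List.pyRange 0 ((n : Int) + 1) 1
        = PySem.List.pyRange 0 (n : Int) 1 ++ [(n : Int)] :=
      PySem.List.pyRange_one_succ_right (by positivity)
    push_cast
    rw [hsplit, List.foldl_append, ih, List.countP_append]
    have hc : (n : Int) + 1 - 1 = (n : Int) := by ring
    simp only [List.foldl_cons, List.foldl_nil, List.countP_cons, List.countP_nil,
      pvStepA, pvQ, hc, Nat.zero_lt_succ, decide_true, Bool.true_and, Nat.zero_add]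
    rcases n with _ | m
    · simp only [Nat.cast_zero, Nat.lt_irrefl, decide_false, Bool.false_and, Bool.not_false,
        Bool.true_and, Bool.false_and]
      by_cases h : (0 : Int) ∈ vals <;> simp [h]
    · simp
      have hz : ¬((1 : Int) + (m : Int) = 0) := by omega
      by_cases h1 : (1 : Int) + (m : Int) ∈ vals <;> by_cases h0 : (m : Int) ∈ vals <;>
        simp [h1, h0, hz] <;> (try split_ifs) <;> simp_all <;> omega

-- the two counts agree: A counts run starts among scanned indices, B among distinct values
lemma pvCountEq (vals : List Int) (hne : vals ≠ []) :
    let m := (PySem.List.max? vals (fun x => x)).getD 0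
    ((PySem.List.pyRange 0 (m + 4) 1).countP (pvQ vals) : Nat)
      = (PySem.Set.ofList vals).countP (pvStartB (PySem.Set.ofList vals)) := by
  intro m
  obtain ⟨mv, hmv⟩ : ∃ mv, PySem.List.max? vals (fun x => x) = some mv := by
    rcases h : PySem.List.max? vals (fun x => x) with _ | mv
    · exact absurd ((PySem.List.max?_eq_none_iff vals (fun x => x)).mp h) hne
    · exact ⟨mv, rfl⟩
  have hmax : ∀ y ∈ vals, y ≤ mv := PySem.List.max?_isMax hmv
  have hm : m = mv := by simp [m, hmv]
  rw [List.countP_eq_length_filter, List.countP_eq_length_filter]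
  have hperm : List.Perm ((PySem.List.pyRange 0 (m + 4) 1).filter (pvQ vals))
      ((PySem.Set.ofList vals).filter (pvStartB (PySem.Set.ofList vals))) := by
    rw [List.perm_ext_iff_of_nodup
      (List.Nodup.filter _ (PySem.List.nodup_pyRange_one 0 (m + 4)))
      (List.Nodup.filter _ (PySem.Set.nodup_ofList vals))]
    intro v
    simp only [List.mem_filter, PySem.List.mem_pyRange_one, pvQ, pvStartB,
      PySem.Set.mem_ofList, Bool.and_eq_true, Bool.or_eq_true, beq_iff_eq,
      Bool.not_eq_true', ← Bool.not_eq_true, List.contains_iff_mem, decide_eq_true_eq]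
    constructor
    · rintro ⟨⟨h0, _⟩, hv, hside⟩
      exact ⟨hv, h0, hside⟩
    · rintro ⟨hv, h0, hside⟩
      have := hmax v hv
      exact ⟨⟨h0, by omega⟩, hv, hside⟩
  exact hperm.length_eq

-- per-key step of A rewritten as B's per-value step
lemma pvKeyStep (vals : List Int) (hne : vals ≠ []) (acc : Int) :
    ((PySem.List.pyRange 0 ((PySem.List.max? vals (fun x => x)).getD 0 + 4) 1).foldl
        (pvStepA vals) (false, acc)).2
    = acc + 2 * (((PySem.Set.ofList vals).countP (pvStartB (PySem.Set.ofList vals)) : Nat) : Int) := by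
  set m := (PySem.List.max? vals (fun x => x)).getD 0 with hmdef
  have hrange : PySem.List.pyRange 0 (m + 4) 1
      = PySem.List.pyRange 0 (((m + 4).toNat : Nat) : Int) 1 := by
    rcases (by omega : 0 ≤ m + 4 ∨ m + 4 < 0) with h | h
    · rw [Int.toNat_of_nonneg h]
    · rw [PySem.List.pyRange_one_eq_nil (by omega), PySem.List.pyRange_one_eq_nil (by omega)]
  rw [hrange, pvScan vals acc ((m + 4).toNat), ← hrange]
  have h := pvCountEq vals hne
  simp only [← hmdef] at h
  rw [h]

-- one dict processed: A's keys loop with lookups equals B's values loop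
lemma pvDictStep (block : List (String × List Int))
    (hblk : ∀ vs ∈ (PySem.Dict.ofList block).values, vs ≠ []) (acc : Int) :
    (PySem.Dict.ofList block).keys.foldl (fun acc key =>
      let vals := ((PySem.Dict.ofList block).get? key).getD []
      let max_value := (PySem.List.max? vals (fun x => x)).getD 0
      ((PySem.List.pyRange 0 (max_value + 4) 1).foldl (pvStepA vals) (false, acc)).2) acc
    = (PySem.Dict.ofList block).values.foldl (fun total vals =>
        let s := PySem.Set.ofList vals
        total + 2 * ((s.countP (pvStartB s) : Nat) : Int)) acc := by
  set d := PySem.Dict.ofList block with hd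
  have hnd : d.keys.Nodup := PySem.Dict.nodup_keys_ofList block
  have hvals : d.values = d.keys.map (fun k => d.getD k []) :=
    PySem.Dict.values_eq_map_keys d hnd []
  rw [hvals, List.foldl_map]
  apply PySem.List.foldl_congr_mem
  intro acc key hkey
  have hmem : d.getD key [] ∈ d.values := by
    rw [hvals]; exact List.mem_map_of_mem hkey
  have hne : d.getD key [] ≠ [] := hblk _ hmem
  simp only [PySem.Dict.getD_eq_get?_getD] at hne ⊢
  exact pvKeyStep _ hne acc

-- ===== VERDICT (by name: the statement is the Claim_ definition above) =====
theorem count_edges_in_blocks_spec : Claim_equal_count_edges_in_blocks := by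
  intro blocks _ hpre
  obtain ⟨hlen, hblk⟩ := hpre
  show count_edges_in_blocks _ = count_edges_in_blocks_alt _
  have hrg : PySem.List.pyRange 0 3 1 = [0, 1, 2] := by decide
  match blocks, hlen with
  | b0 :: b1 :: b2 :: rest, _ =>
    have hb0 := hblk b0 (by simp)
    have hb1 := hblk b1 (by simp)
    have hb2 := hblk b2 (by simp)
    have g0 : PySem.List.pyGet? (b0 :: b1 :: b2 :: rest) 0 = some b0 := by
      rw [show (0 : Int) = ((0 : Nat) : Int) from rfl, PySem.List.pyGet?_natCast]; rfl
    have g1 : PySem.List.pyGet? (b0 :: b1 :: b2 :: rest) 1 = some b1 := by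
      rw [show (1 : Int) = ((1 : Nat) : Int) from rfl, PySem.List.pyGet?_natCast]; rfl
    have g2 : PySem.List.pyGet? (b0 :: b1 :: b2 :: rest) 2 = some b2 := by
      rw [show (2 : Int) = ((2 : Nat) : Int) from rfl, PySem.List.pyGet?_natCast]; rfl
    simp only [count_edges_in_blocks, count_edges_in_blocks_alt, hrg]
    simp only [List.foldl_cons, List.foldl_nil, g0, g1, g2, Option.getD_some]
    rw [pvDictStep b0 hb0, pvDictStep b1 hb1, pvDictStep b2 hb2]
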